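-- pv_equiv track=rewrite | github.com/pbs/cmsplugin-feed | cmsplugin_feed/utils.py | get_credit
-- ===== SOURCE A (Python) =====
-- def get_credit(line):
--     """ Extract a substring as large as possible that starts with one of the
--     hardcoded keywords. This is used to shorten the image credit description """
--     line_lower = line.lower()
--     keywords = ["via ", "illustrated ", "photo ",
--                 "image credit:", "credit:", "image "]
--     minimum = len(line)
--     for keyword in keywords:
--         pos = line_lower.find(keyword)
--         if pos != -1 and pos < minimum:
--             minimum = pos
--
--     if minimum != len(line):
--         return line[minimum:]
--     return line
-- ===== SOURCE B (Python) =====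
-- def get_credit(line):
--     """ Extract a substring as large as possible that starts with one of the
--     hardcoded keywords. This is used to shorten the image credit description """
--     line_lower = line.lower()
--     keywords = ("via ", "illustrated ", "photo ",
--                 "image credit:", "credit:", "image ")
--     for i in range(len(line)):
--         if line_lower.startswith(keywords, i):
--             return line[i:]
--     return line
-- ===== Notes on version B (the rewrite author's own statement) =====
-- stated objective: idiomatic
-- what changed: Replaced six separate full-string find scans with min-position tracking by a single left-to-right positional scan that returns at the first index where startswith matches any keyword of a tuple.
import Mathlib
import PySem

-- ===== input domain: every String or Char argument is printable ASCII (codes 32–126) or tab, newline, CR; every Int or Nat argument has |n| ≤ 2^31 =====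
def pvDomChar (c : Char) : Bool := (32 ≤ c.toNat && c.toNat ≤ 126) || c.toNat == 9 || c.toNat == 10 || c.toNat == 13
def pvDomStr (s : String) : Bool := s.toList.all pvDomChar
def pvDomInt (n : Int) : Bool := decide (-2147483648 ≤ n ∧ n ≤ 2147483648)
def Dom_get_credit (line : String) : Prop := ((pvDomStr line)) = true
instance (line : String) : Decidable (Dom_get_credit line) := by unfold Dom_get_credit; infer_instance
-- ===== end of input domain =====

-- B is an idiomatic single left-to-right positional scan (startswith a keyword tuple at each
-- offset, return at the first hit) instead of A's six full find scans with min tracking.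

-- the hardcoded keyword list, shared constant of both programs
def pvKeywords : List (List Char) :=
  ["via ".toList, "illustrated ".toList, "photo ".toList,
   "image credit:".toList, "credit:".toList, "image ".toList]

-- ===== PORT A =====
def get_credit (line : String) : String :=
  let low := PySem.Chars.lower line.toList
  let minimum : Int :=
    pvKeywords.foldl (fun m kw =>
      if PySem.Chars.find low kw ≠ -1 ∧ PySem.Chars.find low kw < m
      then PySem.Chars.find low kw else m) (line.toList.length : Int)
  if minimum ≠ (line.toList.length : Int) then
    String.ofList (PySem.List.slice line.toList (some minimum) none)
  else line

-- ===== PORT B =====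
-- loop 'for i in range(len(line)): if line_lower.startswith(keywords, i): return line[i:]';
-- 'startswith(tuple, i)' is ported exactly as: some keyword is a prefix of low.drop i
def pvScan (line : String) (L low : List Char) (i : Nat) : String :=
  if i < L.length then
    if pvKeywords.any (fun kw => PySem.Chars.startswith (low.drop i) kw) then
      String.ofList (L.drop i)
    else pvScan line L low (i + 1)
  else line
termination_by L.length - i

def get_credit_alt (line : String) : String :=
  pvScan line line.toList (PySem.Chars.lower line.toList) 0

-- ===== PRECONDITION & SPEC =====
def Spec_get_credit (line : String) (out : String) : Prop := out = get_credit_alt line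
instance (line : String) (out : String) : Decidable (Spec_get_credit line out) := by unfold Spec_get_credit; infer_instance

-- ===== CLAIM (what is proved, stated in full; the proofs are below) =====
def Claim_equal_get_credit : Prop := ∀ (line : String), Dom_get_credit line → Spec_get_credit line (get_credit line)

-- ===== LEMMAS AND PROOFS =====

-- a keyword matches at position i
def pvMatchAt (low : List Char) (i : Nat) : Prop := ∃ kw ∈ pvKeywords, kw <+: low.drop i

lemma pvKeywords_ne_nil : ∀ kw ∈ pvKeywords, kw ≠ [] := by decide

lemma pvMatchAt_iff_any (low : List Char) (i : Nat) :
    (pvKeywords.any (fun kw => PySem.Chars.startswith (low.drop i) kw)) = true ↔ pvMatchAt low i := by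
  simp [pvMatchAt, List.any_eq_true, PySem.Chars.startswith_iff]

-- prefix at i ⇒ find ≠ -1 and find ≤ i
lemma pvFind_le_of_prefix (low kw : List Char) (i : Nat) (h : kw <+: low.drop i) :
    PySem.Chars.find low kw ≠ -1 ∧ PySem.Chars.find low kw ≤ (i : Int) := by
  have hinf : kw <:+: low := by
    rcases h with ⟨t, ht⟩
    exact ⟨low.take i, t, by rw [List.append_assoc, ht, List.take_append_drop]⟩
  have hne : PySem.Chars.find low kw ≠ -1 := (PySem.Chars.find_ne_neg_one_iff low kw).mpr hinf
  have h0 : 0 ≤ PySem.Chars.find low kw := by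
    have := PySem.Chars.neg_one_le_find low kw; omega
  have hspec := PySem.Chars.find_spec (s := low) (sub := kw) h0
  refine ⟨hne, ?_⟩
  by_contra hlt
  rw [not_le] at hlt
  have : i < (PySem.Chars.find low kw).toNat := by omega
  exact hspec.2 i this h

-- found position of a nonempty keyword is strictly below the length
lemma pvFind_lt_length (low kw : List Char) (hkw : kw ≠ [])
    (h0 : 0 ≤ PySem.Chars.find low kw) : PySem.Chars.find low kw < (low.length : Int) := by
  have hspec := (PySem.Chars.find_spec (s := low) (sub := kw) h0).1
  rcases hspec with ⟨t, ht⟩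
  have hlen : kw.length + t.length = low.length - (PySem.Chars.find low kw).toNat := by
    have := congrArg List.length ht; simpa using this
  have hk : 0 < kw.length := List.length_pos_iff.mpr hkw
  have hle := PySem.Chars.find_le_length (s := low) (sub := kw)
  omega

-- characterization of A's fold
lemma pvFold_char (low : List Char) (ks : List (List Char)) (m0 : Int) :
    (ks.foldl (fun m kw =>
      if PySem.Chars.find low kw ≠ -1 ∧ PySem.Chars.find low kw < m
      then PySem.Chars.find low kw else m) m0 = m0 ∨
      ∃ kw ∈ ks, PySem.Chars.find low kw = ks.foldl (fun m kw =>
        if PySem.Chars.find low kw ≠ -1 ∧ PySem.Chars.find low kw < m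
        then PySem.Chars.find low kw else m) m0 ∧ 0 ≤ ks.foldl (fun m kw =>
        if PySem.Chars.find low kw ≠ -1 ∧ PySem.Chars.find low kw < m
        then PySem.Chars.find low kw else m) m0) ∧
    ks.foldl (fun m kw =>
      if PySem.Chars.find low kw ≠ -1 ∧ PySem.Chars.find low kw < m
      then PySem.Chars.find low kw else m) m0 ≤ m0 ∧
    ∀ kw ∈ ks, PySem.Chars.find low kw ≠ -1 → ks.foldl (fun m kw =>
      if PySem.Chars.find low kw ≠ -1 ∧ PySem.Chars.find low kw < m
      then PySem.Chars.find low kw else m) m0 ≤ PySem.Chars.find low kw := by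
  induction ks generalizing m0 with
  | nil => exact ⟨Or.inl rfl, le_refl _, by simp⟩
  | cons k ks ih =>
    simp only [List.foldl_cons]
    generalize hm1 : (if PySem.Chars.find low k ≠ -1 ∧ PySem.Chars.find low k < m0 then PySem.Chars.find low k else m0) = m1
    obtain ⟨hc, hle, hall⟩ := ih m1
    have hneg := PySem.Chars.neg_one_le_find low k
    have hm1le : m1 ≤ m0 := by rw [← hm1]; split <;> omega
    refine ⟨?_, by omega, ?_⟩
    · rcases hc with h | ⟨kw, hkw, hfk, h0⟩
      · by_cases hk : PySem.Chars.find low k ≠ -1 ∧ PySem.Chars.find low k < m0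
        · right
          refine ⟨k, by simp, ?_, ?_⟩
          · rw [h, ← hm1, if_pos hk]
          · rw [h, ← hm1, if_pos hk]; omega
        · left; rw [h, ← hm1, if_neg hk]
      · right; exact ⟨kw, by simp [hkw], hfk, h0⟩
    · intro kw hkw hne
      rcases List.mem_cons.mp hkw with rfl | hmem
      · by_cases hk : PySem.Chars.find low kw ≠ -1 ∧ PySem.Chars.find low kw < m0
        · have : m1 = PySem.Chars.find low kw := by rw [← hm1, if_pos hk]
          omega
        · have : m0 ≤ PySem.Chars.find low kw := by
            rcases not_and_or.mp hk with h | h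
            · exact absurd hne (not_not.mp (by simpa using h))
            · omega
          omega
      · exact hall kw hmem hne

lemma pvLower_length (L : List Char) : (PySem.Chars.lower L).length = L.length := by
  simp [PySem.Chars.lower]

-- B's loop returns line when nothing matches from i on
lemma pvScan_none (line : String) (L low : List Char) (i : Nat)
    (h : ∀ j, i ≤ j → ¬ pvMatchAt low j) : pvScan line L low i = line := by
  rw [pvScan]
  split
  · rw [if_neg, pvScan_none line L low (i+1) (fun j hj => h j (by omega))]
    intro hc
    exact h i le_rfl ((pvMatchAt_iff_any low i).mp hc)
  · rfl
termination_by L.length - i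

-- B's loop returns L.drop t where t is the first match position
lemma pvScan_first (line : String) (L low : List Char) (i t : Nat)
    (hit : i ≤ t) (ht : t < L.length) (hm : pvMatchAt low t)
    (hbefore : ∀ j, i ≤ j → j < t → ¬ pvMatchAt low j) :
    pvScan line L low i = String.ofList (L.drop t) := by
  rw [pvScan]
  rw [if_pos (by omega)]
  by_cases hi : i = t
  · subst hi
    rw [if_pos ((pvMatchAt_iff_any low i).mpr hm)]
  · rw [if_neg, pvScan_first line L low (i+1) t (by omega) ht hm
      (fun j hj1 hj2 => hbefore j (by omega) hj2)]
    intro hc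
    exact hbefore i le_rfl (by omega) ((pvMatchAt_iff_any low i).mp hc)
termination_by t - i

-- ===== VERDICT (by name: the statement is the Claim_ definition above) =====
theorem get_credit_spec : Claim_equal_get_credit := by
  intro line _
  unfold Spec_get_credit get_credit get_credit_alt
  set L := line.toList with hL
  set low := PySem.Chars.lower L with hlow
  have hlen : low.length = L.length := pvLower_length L
  obtain ⟨hc, hle, hall⟩ := pvFold_char low pvKeywords (L.length : Int)
  set m := pvKeywords.foldl (fun m kw =>
      if PySem.Chars.find low kw ≠ -1 ∧ PySem.Chars.find low kw < m
      then PySem.Chars.find low kw else m) ((L.length : Nat) : Int) with hm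
  by_cases hcase : m = (L.length : Int)
  · -- no keyword occurs: A returns line, B's scan never matches
    rw [if_neg (by simpa using hcase)]
    refine (pvScan_none line L low 0 ?_).symm
    intro j _ ⟨kw, hkw, hpre⟩
    obtain ⟨hne, hlej⟩ := pvFind_le_of_prefix low kw j hpre
    have h0 : 0 ≤ PySem.Chars.find low kw := by
      have := PySem.Chars.neg_one_le_find low kw; omega
    have hlt := pvFind_lt_length low kw (pvKeywords_ne_nil kw hkw) h0
    have := hall kw hkw hne
    rw [hlen] at hlt
    omega
  · -- some keyword occurs; m is the least matching position
    rw [if_pos (by simpa using hcase)]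
    rcases hc with h | ⟨kw, hkw, hfk, h0⟩
    · exact absurd h hcase
    have h0' : 0 ≤ PySem.Chars.find low kw := by omega
    have hpre : kw <+: low.drop m.toNat := by
      have := (PySem.Chars.find_spec (s := low) (sub := kw) h0').1
      rw [hfk] at this; exact this
    have hltlen : m < (L.length : Int) := by
      have := pvFind_lt_length low kw (pvKeywords_ne_nil kw hkw) h0'
      rw [hfk, hlen] at this; exact this
    have hslice : PySem.List.slice L (some m) none = L.drop m.toNat :=
      PySem.List.slice_from L h0
    rw [hslice]
    refine (pvScan_first line L low 0 m.toNat (by omega) (by omega) ⟨kw, hkw, hpre⟩ ?_).symm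
    intro j _ hjlt ⟨kw', hkw', hpre'⟩
    obtain ⟨hne', hlej'⟩ := pvFind_le_of_prefix low kw' j hpre'
    have := hall kw' hkw' hne'
    omega
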